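-- pv_equiv track=rewrite | github.com/Hanalyx/OpenWatch | backend/app/services/error_sanitization.py | _make_guidance_generic
-- ===== SOURCE A (Python) =====
-- def _make_guidance_generic(guidance: str) -> str:
--     """Convert specific guidance to generic actionable advice"""
--     generic_replacements = {
--         "Check if SSH service is running on port [REDACTED]": "Verify SSH service is running on the correct port",
--         "Verify the hostname [REDACTED] is correct": "Verify the target hostname is correct",
--         "Add public key to [PATH_REDACTED] on target host": "Ensure SSH public key is authorized on target host",
--         "Configure passwordless sudo for [COMMAND_REDACTED]": "Configure appropriate system privileges for scanning",
--         "Free up disk space in [PATH_REDACTED]": "Free up sufficient disk space on target system",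
--         "Check [COMMAND_REDACTED] service status": "Check required service status on target system",
--     }
--
--     result = guidance
--     for specific, generic in generic_replacements.items():
--         result = result.replace(specific, generic)
--
--     return result
-- ===== SOURCE B (Python) =====
-- _RULES = [
--     ("Check if SSH service is running on port [REDACTED]", "Verify SSH service is running on the correct port"),
--     ("Verify the hostname [REDACTED] is correct", "Verify the target hostname is correct"),
--     ("Add public key to [PATH_REDACTED] on target host", "Ensure SSH public key is authorized on target host"),
--     ("Configure passwordless sudo for [COMMAND_REDACTED]", "Configure appropriate system privileges for scanning"),
--     ("Free up disk space in [PATH_REDACTED]", "Free up sufficient disk space on target system"),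
--     ("Check [COMMAND_REDACTED] service status", "Check required service status on target system"),
-- ]
--
--
-- def _make_guidance_generic(guidance: str) -> str:
--     """Convert specific guidance to generic advice in ONE left-to-right scan."""
--     out = []
--     i = 0
--     n = len(guidance)
--     while i < n:
--         for key, val in _RULES:
--             if guidance.startswith(key, i):
--                 out.append(val)
--                 i += len(key)
--                 break
--         else:
--             out.append(guidance[i])
--             i += 1
--     return "".join(out)
-- ===== Notes on version B (the rewrite author's own statement) =====
-- stated objective: alternative
-- what changed: Replaces six sequential str.replace passes with a single left-to-right scan over the string that applies the first matching rule from a compiled rule table at each position; equivalence holds because the keys never overlap each other or the replacement values.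
import Mathlib
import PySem

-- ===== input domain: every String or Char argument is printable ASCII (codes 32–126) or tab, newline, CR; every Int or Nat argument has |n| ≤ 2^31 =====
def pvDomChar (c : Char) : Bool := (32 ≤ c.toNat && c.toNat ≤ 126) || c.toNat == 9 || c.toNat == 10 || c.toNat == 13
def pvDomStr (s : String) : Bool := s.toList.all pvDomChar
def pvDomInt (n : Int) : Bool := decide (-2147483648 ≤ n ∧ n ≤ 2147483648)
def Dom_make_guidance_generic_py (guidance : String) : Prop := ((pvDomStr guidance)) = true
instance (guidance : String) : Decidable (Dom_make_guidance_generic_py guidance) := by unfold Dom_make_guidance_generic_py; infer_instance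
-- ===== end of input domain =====

-- B replaces A's six sequential str.replace passes by ONE left-to-right scanner over a compiled
-- rule table (first matching rule wins); equivalent because the keys never overlap each other
-- or the replacement values.

-- ===== PORT A =====
-- A's dict literal (insertion order) as an association list of (specific, generic) pairs
def pvTbl : List (String × String) :=
  [("Check if SSH service is running on port [REDACTED]", "Verify SSH service is running on the correct port"),
   ("Verify the hostname [REDACTED] is correct", "Verify the target hostname is correct"),
   ("Add public key to [PATH_REDACTED] on target host", "Ensure SSH public key is authorized on target host"),
   ("Configure passwordless sudo for [COMMAND_REDACTED]", "Configure appropriate system privileges for scanning"),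
   ("Free up disk space in [PATH_REDACTED]", "Free up sufficient disk space on target system"),
   ("Check [COMMAND_REDACTED] service status", "Check required service status on target system")]

-- result = guidance; for specific, generic in items: result = result.replace(specific, generic)
def make_guidance_generic_py (guidance : String) : String :=
  pvTbl.foldl (fun result sv => PySem.Str.replace result sv.1 sv.2) guidance

-- ===== PORT B =====
-- Source B's _RULES, compiled to the List Char form the scanner consumes (a Python str is a
-- sequence of characters; this is that sequence written out)
def pvRules : List (List Char × List Char) :=
  [   (['C', 'h', 'e', 'c', 'k', ' ', 'i', 'f', ' ', 'S', 'S', 'H', ' ', 's', 'e', 'r', 'v', 'i', 'c', 'e', ' ', 'i', 's', ' ', 'r', 'u', 'n', 'n', 'i', 'n', 'g', ' ', 'o', 'n', ' ', 'p', 'o', 'r', 't', ' ', '[', 'R', 'E', 'D', 'A', 'C', 'T', 'E', 'D', ']'],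
    ['V', 'e', 'r', 'i', 'f', 'y', ' ', 'S', 'S', 'H', ' ', 's', 'e', 'r', 'v', 'i', 'c', 'e', ' ', 'i', 's', ' ', 'r', 'u', 'n', 'n', 'i', 'n', 'g', ' ', 'o', 'n', ' ', 't', 'h', 'e', ' ', 'c', 'o', 'r', 'r', 'e', 'c', 't', ' ', 'p', 'o', 'r', 't']),
   (['V', 'e', 'r', 'i', 'f', 'y', ' ', 't', 'h', 'e', ' ', 'h', 'o', 's', 't', 'n', 'a', 'm', 'e', ' ', '[', 'R', 'E', 'D', 'A', 'C', 'T', 'E', 'D', ']', ' ', 'i', 's', ' ', 'c', 'o', 'r', 'r', 'e', 'c', 't'],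
    ['V', 'e', 'r', 'i', 'f', 'y', ' ', 't', 'h', 'e', ' ', 't', 'a', 'r', 'g', 'e', 't', ' ', 'h', 'o', 's', 't', 'n', 'a', 'm', 'e', ' ', 'i', 's', ' ', 'c', 'o', 'r', 'r', 'e', 'c', 't']),
   (['A', 'd', 'd', ' ', 'p', 'u', 'b', 'l', 'i', 'c', ' ', 'k', 'e', 'y', ' ', 't', 'o', ' ', '[', 'P', 'A', 'T', 'H', '_', 'R', 'E', 'D', 'A', 'C', 'T', 'E', 'D', ']', ' ', 'o', 'n', ' ', 't', 'a', 'r', 'g', 'e', 't', ' ', 'h', 'o', 's', 't'],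
    ['E', 'n', 's', 'u', 'r', 'e', ' ', 'S', 'S', 'H', ' ', 'p', 'u', 'b', 'l', 'i', 'c', ' ', 'k', 'e', 'y', ' ', 'i', 's', ' ', 'a', 'u', 't', 'h', 'o', 'r', 'i', 'z', 'e', 'd', ' ', 'o', 'n', ' ', 't', 'a', 'r', 'g', 'e', 't', ' ', 'h', 'o', 's', 't']),
   (['C', 'o', 'n', 'f', 'i', 'g', 'u', 'r', 'e', ' ', 'p', 'a', 's', 's', 'w', 'o', 'r', 'd', 'l', 'e', 's', 's', ' ', 's', 'u', 'd', 'o', ' ', 'f', 'o', 'r', ' ', '[', 'C', 'O', 'M', 'M', 'A', 'N', 'D', '_', 'R', 'E', 'D', 'A', 'C', 'T', 'E', 'D', ']'],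
    ['C', 'o', 'n', 'f', 'i', 'g', 'u', 'r', 'e', ' ', 'a', 'p', 'p', 'r', 'o', 'p', 'r', 'i', 'a', 't', 'e', ' ', 's', 'y', 's', 't', 'e', 'm', ' ', 'p', 'r', 'i', 'v', 'i', 'l', 'e', 'g', 'e', 's', ' ', 'f', 'o', 'r', ' ', 's', 'c', 'a', 'n', 'n', 'i', 'n', 'g']),
   (['F', 'r', 'e', 'e', ' ', 'u', 'p', ' ', 'd', 'i', 's', 'k', ' ', 's', 'p', 'a', 'c', 'e', ' ', 'i', 'n', ' ', '[', 'P', 'A', 'T', 'H', '_', 'R', 'E', 'D', 'A', 'C', 'T', 'E', 'D', ']'],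
    ['F', 'r', 'e', 'e', ' ', 'u', 'p', ' ', 's', 'u', 'f', 'f', 'i', 'c', 'i', 'e', 'n', 't', ' ', 'd', 'i', 's', 'k', ' ', 's', 'p', 'a', 'c', 'e', ' ', 'o', 'n', ' ', 't', 'a', 'r', 'g', 'e', 't', ' ', 's', 'y', 's', 't', 'e', 'm']),
   (['C', 'h', 'e', 'c', 'k', ' ', '[', 'C', 'O', 'M', 'M', 'A', 'N', 'D', '_', 'R', 'E', 'D', 'A', 'C', 'T', 'E', 'D', ']', ' ', 's', 'e', 'r', 'v', 'i', 'c', 'e', ' ', 's', 't', 'a', 't', 'u', 's'],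
    ['C', 'h', 'e', 'c', 'k', ' ', 'r', 'e', 'q', 'u', 'i', 'r', 'e', 'd', ' ', 's', 'e', 'r', 'v', 'i', 'c', 'e', ' ', 's', 't', 'a', 't', 'u', 's', ' ', 'o', 'n', ' ', 't', 'a', 'r', 'g', 'e', 't', ' ', 's', 'y', 's', 't', 'e', 'm'])]

-- every key is nonempty (used for termination of the scan)
theorem pvRules_pos : ∀ pv ∈ pvRules, 1 ≤ pv.1.length := by decide

-- Source B's while-loop: at each position, the FIRST rule (table order) whose key starts here is
-- applied — its value is emitted and the scan resumes after the key; otherwise the character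
-- is copied and the scan advances by one.
def pvScan : List Char → List Char
  | [] => []
  | c :: t =>
    match h : pvRules.find? (fun pv => pv.1.isPrefixOf (c :: t)) with
    | some pv => pv.2 ++ pvScan ((c :: t).drop pv.1.length)
    | none => c :: pvScan t
  termination_by l => l.length
  decreasing_by
  · have hpos := pvRules_pos pv (List.mem_of_find?_eq_some h)
    simp only [List.length_drop, List.length_cons]
    omega
  · simp

def make_guidance_generic_py_alt (guidance : String) : String :=
  String.ofList (pvScan guidance.toList)

-- ===== PRECONDITION & SPEC =====
def Spec_make_guidance_generic_py (guidance : String) (out : String) : Prop := out = make_guidance_generic_py_alt guidance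
instance (guidance : String) (out : String) : Decidable (Spec_make_guidance_generic_py guidance out) := by unfold Spec_make_guidance_generic_py; infer_instance

-- ===== CLAIM (what is proved, stated in full; the proofs are below) =====
def Claim_equal_make_guidance_generic_py : Prop := ∀ (guidance : String), Dom_make_guidance_generic_py guidance → Spec_make_guidance_generic_py guidance (make_guidance_generic_py guidance)

-- ===== LEMMAS AND PROOFS =====

-- fuelled simultaneous one-pass replacement over an arbitrary pattern table P
def pvRunF (P : List (List Char × List Char)) : Nat → List Char → List Char
  | _, [] => []
  | 0, l => l
  | f+1, c :: t =>
    match P.find? (fun pv => pv.1.isPrefixOf (c :: t)) with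
    | some pv => pv.2 ++ pvRunF P f ((c :: t).drop pv.1.length)
    | none => c :: pvRunF P f t

def pvRun (P : List (List Char × List Char)) (l : List Char) : List Char := pvRunF P l.length l

-- all patterns of P are nonempty
def PatsOK (P : List (List Char × List Char)) : Prop := ∀ pv ∈ P, 1 ≤ pv.1.length

-- p cannot begin at any position inside u (neither inside it nor straddling its right end)
def pvNoStart (u p : List Char) : Prop := ∀ j < u.length, ¬(u.drop j <+: p ∨ p <+: u.drop j)

-- no nonempty suffix of p is prefix-related to any replacement value of P
def pvNoNew (p : List Char) (P : List (List Char × List Char)) : Prop :=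
  ∀ pv ∈ P, ∀ m < p.length, ¬(p.drop m <+: pv.2 ∨ pv.2 <+: p.drop m)

theorem pv_prefix_append_cases {p a b : List Char} (h : p <+: a ++ b) : p <+: a ∨ a <+: p := by
  rcases h with ⟨r, hr⟩
  rcases List.append_eq_append_iff.mp hr.symm with ⟨x, hx1, hx2⟩ | ⟨x, hx1, hx2⟩
  · exact Or.inr ⟨x, hx1.symm⟩
  · exact Or.inl ⟨x, hx1.symm⟩

theorem pvRunF_fuel (P : List (List Char × List Char)) (hP : PatsOK P) :
    ∀ f f' (l : List Char), l.length ≤ f → l.length ≤ f' → pvRunF P f l = pvRunF P f' l := by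
  intro f
  induction f with
  | zero =>
    intro f' l h1 _
    have hl : l = [] := List.eq_nil_of_length_eq_zero (Nat.le_zero.mp h1)
    subst hl
    cases f' <;> simp [pvRunF]
  | succ f ih =>
    intro f' l h1 h2
    cases l with
    | nil => cases f' <;> simp [pvRunF]
    | cons c t =>
      cases f' with
      | zero => simp at h2
      | succ g =>
        simp only [pvRunF]
        cases hfind : P.find? (fun pv => pv.1.isPrefixOf (c :: t)) with
        | some pv =>
          have hpos := hP pv (List.mem_of_find?_eq_some hfind)
          simp only [List.length_cons] at h1 h2
          have hd : ((c :: t).drop pv.1.length).length ≤ f := by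
            simp only [List.length_drop, List.length_cons]; omega
          have hd' : ((c :: t).drop pv.1.length).length ≤ g := by
            simp only [List.length_drop, List.length_cons]; omega
          dsimp only
          rw [ih g _ hd hd']
        | none =>
          simp only [List.length_cons] at h1 h2
          dsimp only
          rw [ih g t (by omega) (by omega)]

theorem pvRun_cons_none (P : List (List Char × List Char)) {c : Char} {t : List Char}
    (h : P.find? (fun pv => pv.1.isPrefixOf (c :: t)) = none) :
    pvRun P (c :: t) = c :: pvRun P t := by
  unfold pvRun
  simp only [List.length_cons, pvRunF, h]

theorem pvRun_cons_match (P : List (List Char × List Char)) (hP : PatsOK P) {c : Char} {t : List Char}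
    {pv : List Char × List Char}
    (h : P.find? (fun pv => pv.1.isPrefixOf (c :: t)) = some pv) :
    pvRun P (c :: t) = pv.2 ++ pvRun P ((c :: t).drop pv.1.length) := by
  unfold pvRun
  simp only [List.length_cons, pvRunF, h]
  congr 1
  have hpos := hP pv (List.mem_of_find?_eq_some h)
  exact pvRunF_fuel P hP t.length _ _
    (by simp only [List.length_drop, List.length_cons]; omega) le_rfl

-- general-l versions
theorem pvRun_match (P : List (List Char × List Char)) (hP : PatsOK P) {l : List Char}
    {pv : List Char × List Char} (hl : l ≠ [])
    (h : P.find? (fun pv => pv.1.isPrefixOf l) = some pv) :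
    pvRun P l = pv.2 ++ pvRun P (l.drop pv.1.length) := by
  cases l with
  | nil => exact absurd rfl hl
  | cons c t => exact pvRun_cons_match P hP h

theorem pvScan_eq (l : List Char) : pvScan l = pvRun pvRules l := by
  suffices key : ∀ n (l : List Char), l.length ≤ n → pvScan l = pvRun pvRules l from
    key l.length l le_rfl
  intro n
  induction n with
  | zero =>
    intro l h
    have : l = [] := List.eq_nil_of_length_eq_zero (Nat.le_zero.mp h)
    subst this
    simp [pvScan.eq_def, pvRun, pvRunF]
  | succ n ih =>
    intro l hlen
    cases l with
    | nil => simp [pvScan.eq_def, pvRun, pvRunF]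
    | cons c t =>
      simp only [List.length_cons] at hlen
      rw [pvScan.eq_def]
      dsimp only
      split
      · rename_i pv heq
        have hpos := pvRules_pos pv (List.mem_of_find?_eq_some heq)
        rw [pvRun_cons_match pvRules pvRules_pos heq,
            ih _ (by simp only [List.length_drop, List.length_cons]; omega)]
      · rename_i heq
        rw [pvRun_cons_none pvRules heq, ih t (by omega)]

theorem pvRun_skip (P : List (List Char × List Char)) (hP : PatsOK P) :
    ∀ (u X : List Char), (∀ pv ∈ P, pvNoStart u pv.1) → pvRun P (u ++ X) = u ++ pvRun P X := by
  intro u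
  induction u with
  | nil => intro X _; rfl
  | cons c u' ih =>
    intro X hc
    have hfind : P.find? (fun pv => pv.1.isPrefixOf (c :: (u' ++ X))) = none := by
      rw [List.find?_eq_none]
      intro pv hm hpre
      have hpre' : pv.1 <+: (c :: u') ++ X := List.isPrefixOf_iff_prefix.mp hpre
      rcases pv_prefix_append_cases hpre' with h' | h'
      · exact (hc pv hm 0 (by simp)) (Or.inr h')
      · exact (hc pv hm 0 (by simp)) (Or.inl h')
    have : (c :: u') ++ X = c :: (u' ++ X) := rfl
    rw [this, pvRun_cons_none P hfind,
        ih X (fun pv hm j hj => hc pv hm (j+1) (by simpa using Nat.succ_lt_succ hj))]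
    rfl

theorem pvRun_no_new (P : List (List Char × List Char)) (p : List Char) (hP : PatsOK P)
    (hv : pvNoNew p P) :
    ∀ (t : List Char) (m : Nat), p.drop m <+: pvRun P t → p.drop m <+: t := by
  intro t
  induction t with
  | nil =>
    intro m h
    simpa [pvRun, pvRunF] using h
  | cons c t ih =>
    intro m h
    by_cases hm : m < p.length
    · cases hfind : P.find? (fun pv => pv.1.isPrefixOf (c :: t)) with
      | some pv =>
        rw [pvRun_cons_match P hP hfind] at h
        rcases pv_prefix_append_cases h with h' | h'
        · exact absurd (Or.inl h') (hv pv (List.mem_of_find?_eq_some hfind) m hm)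
        · exact absurd (Or.inr h') (hv pv (List.mem_of_find?_eq_some hfind) m hm)
      | none =>
        rw [pvRun_cons_none P hfind] at h
        have hne : p.drop m ≠ [] := by
          rw [Ne, List.drop_eq_nil_iff]; omega
        obtain ⟨q0, q, hq⟩ := List.exists_cons_of_ne_nil hne
        rw [hq] at h
        obtain ⟨he, hpre⟩ := List.cons_prefix_cons.mp h
        have hq' : p.drop (m+1) = q := by
          rw [List.drop_add_one_eq_tail_drop, hq]
          rfl
        have := ih (m+1) (by rw [hq']; exact hpre)
        rw [hq, he]
        exact List.cons_prefix_cons.mpr ⟨rfl, by rwa [hq'] at this⟩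
    · have : p.drop m = [] := List.drop_eq_nil_iff.mpr (by omega)
      rw [this]
      exact List.nil_prefix

theorem pvRun_step (P : List (List Char × List Char)) (p v : List Char)
    (hP : PatsOK P) (hp : 1 ≤ p.length)
    (h1 : ∀ pv ∈ P, pvNoStart pv.2 p)
    (h2 : pvNoNew p P)
    (h3 : ∀ pv ∈ P, pvNoStart p pv.1) :
    ∀ t, pvRun [(p, v)] (pvRun P t) = pvRun (P ++ [(p, v)]) t := by
  have hP1 : PatsOK [(p, v)] := by
    intro pv hm
    simp only [List.mem_singleton] at hm
    subst hm; exact hp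
  have hP' : PatsOK (P ++ [(p, v)]) := by
    intro pv hm
    rcases List.mem_append.mp hm with hm | hm
    · exact hP pv hm
    · simp only [List.mem_singleton] at hm; subst hm; exact hp
  suffices key : ∀ n (t : List Char), t.length ≤ n →
      pvRun [(p, v)] (pvRun P t) = pvRun (P ++ [(p, v)]) t from
    fun t => key t.length t le_rfl
  intro n
  induction n with
  | zero =>
    intro t h
    have : t = [] := List.eq_nil_of_length_eq_zero (Nat.le_zero.mp h)
    subst this
    rfl
  | succ n ih =>
    intro t hlen
    cases t with
    | nil => rfl
    | cons c t₂ =>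
      simp only [List.length_cons] at hlen
      cases hfind : P.find? (fun pv => pv.1.isPrefixOf (c :: t₂)) with
      | some pv' =>
        have hmem := List.mem_of_find?_eq_some hfind
        have hfind' : (P ++ [(p, v)]).find? (fun pv => pv.1.isPrefixOf (c :: t₂)) = some pv' := by
          rw [List.find?_append, hfind]; rfl
        rw [pvRun_cons_match P hP hfind, pvRun_cons_match _ hP' hfind']
        rw [pvRun_skip [(p, v)] hP1 pv'.2 _
            (by intro x hx
                simp only [List.mem_singleton] at hx
                subst hx
                exact h1 pv' hmem)]
        congr 1
        have hpos := hP pv' hmem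
        exact ih _ (by simp only [List.length_drop, List.length_cons]; omega)
      | none =>
        by_cases hpt : p <+: c :: t₂
        · have hdec : p ++ (c :: t₂).drop p.length = c :: t₂ := List.prefix_iff_eq_append.mp hpt
          have hrunP : pvRun P (c :: t₂) = p ++ pvRun P ((c :: t₂).drop p.length) := by
            conv_lhs => rw [← hdec]
            exact pvRun_skip P hP p _ h3
          rw [hrunP]
          have hne : p ++ pvRun P ((c :: t₂).drop p.length) ≠ [] := by
            cases p with
            | nil => simp at hp
            | cons a b => simp
          have hfind1 : [(p, v)].find? (fun pv => pv.1.isPrefixOf (p ++ pvRun P ((c :: t₂).drop p.length))) = some (p, v) := by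
            simp only [List.find?]
            rw [List.isPrefixOf_iff_prefix.mpr (List.prefix_append p _)]
          rw [pvRun_match [(p, v)] hP1 hne hfind1]
          simp only [List.drop_left]
          have hfind'' : (P ++ [(p, v)]).find? (fun pv => pv.1.isPrefixOf (c :: t₂)) = some (p, v) := by
            rw [List.find?_append, hfind]
            simp only [Option.none_or, List.find?]
            rw [List.isPrefixOf_iff_prefix.mpr hpt]
          rw [pvRun_cons_match _ hP' hfind'']
          congr 1
          exact ih _ (by simp only [List.length_drop, List.length_cons]; omega)
        · have hfind'' : (P ++ [(p, v)]).find? (fun pv => pv.1.isPrefixOf (c :: t₂)) = none := by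
            rw [List.find?_append, hfind]
            simp only [Option.none_or, List.find?_eq_none]
            intro x hx
            simp only [List.mem_singleton] at hx
            subst hx
            simpa [List.isPrefixOf_iff_prefix] using hpt
          rw [pvRun_cons_none P hfind, pvRun_cons_none _ hfind'']
          have hnone2 : [(p, v)].find? (fun pv => pv.1.isPrefixOf (c :: pvRun P t₂)) = none := by
            simp only [List.find?_eq_none]
            intro x hx
            simp only [List.mem_singleton] at hx
            subst hx
            simp only [List.isPrefixOf_iff_prefix]
            intro hcon
            cases hple : p with
            | nil => simp [hple] at hp
            | cons p0 p' =>
              rw [hple] at hcon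
              obtain ⟨he, hpre⟩ := List.cons_prefix_cons.mp hcon
              have hq' : p.drop 1 = p' := by rw [hple]; rfl
              have := pvRun_no_new P p hP h2 t₂ 1 (by rw [hq']; exact hpre)
              rw [hq'] at this
              exact hpt (by rw [hple]; exact List.cons_prefix_cons.mpr ⟨he, this⟩)
          rw [pvRun_cons_none [(p, v)] hnone2]
          rw [ih t₂ (by omega)]

theorem pvGo_eq (o v : List Char) (ho : o ≠ []) :
    ∀ f (l acc : List Char), l.length ≤ f →
      PySem.Chars.replace.go o v f l acc = acc.reverse ++ pvRunF [(o, v)] f l := by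
  intro f
  induction f with
  | zero =>
    intro l acc h
    have : l = [] := List.eq_nil_of_length_eq_zero (Nat.le_zero.mp h)
    subst this
    simp [PySem.Chars.replace.go, pvRunF]
  | succ f ih =>
    intro l acc h
    cases l with
    | nil => simp [PySem.Chars.replace.go, pvRunF]
    | cons c t =>
      simp only [List.length_cons] at h
      rw [PySem.Chars.replace.go]
      by_cases hpre : o.isPrefixOf (c :: t)
      · have hfind : [(o, v)].find? (fun pv => pv.1.isPrefixOf (c :: t)) = some (o, v) := by
          simp [List.find?, hpre]
        simp only [hpre, if_true, pvRunF, hfind]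
        have hol : 1 ≤ o.length := by
          cases o with
          | nil => exact absurd rfl ho
          | cons a b => simp
        rw [ih _ _ (by simp only [List.length_drop, List.length_cons]; omega)]
        simp
      · have hfind : [(o, v)].find? (fun pv => pv.1.isPrefixOf (c :: t)) = none := by
          simp [List.find?, hpre]
        simp only [hpre, pvRunF, hfind]
        rw [ih t (c :: acc) (by omega)]
        simp

theorem replace_eq_pvRun (o v : List Char) (ho : o ≠ []) (l : List Char) :
    PySem.Chars.replace l o v = pvRun [(o, v)] l := by
  rw [PySem.Chars.replace, if_neg (by simpa using ho)]
  simpa using pvGo_eq o v ho l.length l [] le_rfl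

set_option maxHeartbeats 4000000 in
theorem pvChain (l : List Char) :
    PySem.Chars.replace (PySem.Chars.replace (PySem.Chars.replace (PySem.Chars.replace (PySem.Chars.replace (PySem.Chars.replace l
      "Check if SSH service is running on port [REDACTED]".toList "Verify SSH service is running on the correct port".toList)
      "Verify the hostname [REDACTED] is correct".toList "Verify the target hostname is correct".toList)
      "Add public key to [PATH_REDACTED] on target host".toList "Ensure SSH public key is authorized on target host".toList)
      "Configure passwordless sudo for [COMMAND_REDACTED]".toList "Configure appropriate system privileges for scanning".toList)
      "Free up disk space in [PATH_REDACTED]".toList "Free up sufficient disk space on target system".toList)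
      "Check [COMMAND_REDACTED] service status".toList "Check required service status on target system".toList
    = pvRun pvRules l := by
  rw [replace_eq_pvRun "Check if SSH service is running on port [REDACTED]".toList "Verify SSH service is running on the correct port".toList (by decide) l]
  rw [replace_eq_pvRun "Verify the hostname [REDACTED] is correct".toList "Verify the target hostname is correct".toList (by decide) (pvRun [("Check if SSH service is running on port [REDACTED]".toList, "Verify SSH service is running on the correct port".toList)] l)]
  rw [pvRun_step [("Check if SSH service is running on port [REDACTED]".toList, "Verify SSH service is running on the correct port".toList)] "Verify the hostname [REDACTED] is correct".toList "Verify the target hostname is correct".toList (by simp only [PatsOK]; decide) (by decide) (by simp only [pvNoStart]; decide) (by simp only [pvNoNew]; decide) (by simp only [pvNoStart]; decide) l]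
  simp only [List.cons_append, List.nil_append]
  rw [replace_eq_pvRun "Add public key to [PATH_REDACTED] on target host".toList "Ensure SSH public key is authorized on target host".toList (by decide) (pvRun [("Check if SSH service is running on port [REDACTED]".toList, "Verify SSH service is running on the correct port".toList), ("Verify the hostname [REDACTED] is correct".toList, "Verify the target hostname is correct".toList)] l)]
  rw [pvRun_step [("Check if SSH service is running on port [REDACTED]".toList, "Verify SSH service is running on the correct port".toList), ("Verify the hostname [REDACTED] is correct".toList, "Verify the target hostname is correct".toList)] "Add public key to [PATH_REDACTED] on target host".toList "Ensure SSH public key is authorized on target host".toList (by simp only [PatsOK]; decide) (by decide) (by simp only [pvNoStart]; decide) (by simp only [pvNoNew]; decide) (by simp only [pvNoStart]; decide) l]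
  simp only [List.cons_append, List.nil_append]
  rw [replace_eq_pvRun "Configure passwordless sudo for [COMMAND_REDACTED]".toList "Configure appropriate system privileges for scanning".toList (by decide) (pvRun [("Check if SSH service is running on port [REDACTED]".toList, "Verify SSH service is running on the correct port".toList), ("Verify the hostname [REDACTED] is correct".toList, "Verify the target hostname is correct".toList), ("Add public key to [PATH_REDACTED] on target host".toList, "Ensure SSH public key is authorized on target host".toList)] l)]
  rw [pvRun_step [("Check if SSH service is running on port [REDACTED]".toList, "Verify SSH service is running on the correct port".toList), ("Verify the hostname [REDACTED] is correct".toList, "Verify the target hostname is correct".toList), ("Add public key to [PATH_REDACTED] on target host".toList, "Ensure SSH public key is authorized on target host".toList)] "Configure passwordless sudo for [COMMAND_REDACTED]".toList "Configure appropriate system privileges for scanning".toList (by simp only [PatsOK]; decide) (by decide) (by simp only [pvNoStart]; decide) (by simp only [pvNoNew]; decide) (by simp only [pvNoStart]; decide) l]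
  simp only [List.cons_append, List.nil_append]
  rw [replace_eq_pvRun "Free up disk space in [PATH_REDACTED]".toList "Free up sufficient disk space on target system".toList (by decide) (pvRun [("Check if SSH service is running on port [REDACTED]".toList, "Verify SSH service is running on the correct port".toList), ("Verify the hostname [REDACTED] is correct".toList, "Verify the target hostname is correct".toList), ("Add public key to [PATH_REDACTED] on target host".toList, "Ensure SSH public key is authorized on target host".toList), ("Configure passwordless sudo for [COMMAND_REDACTED]".toList, "Configure appropriate system privileges for scanning".toList)] l)]
  rw [pvRun_step [("Check if SSH service is running on port [REDACTED]".toList, "Verify SSH service is running on the correct port".toList), ("Verify the hostname [REDACTED] is correct".toList, "Verify the target hostname is correct".toList), ("Add public key to [PATH_REDACTED] on target host".toList, "Ensure SSH public key is authorized on target host".toList), ("Configure passwordless sudo for [COMMAND_REDACTED]".toList, "Configure appropriate system privileges for scanning".toList)] "Free up disk space in [PATH_REDACTED]".toList "Free up sufficient disk space on target system".toList (by simp only [PatsOK]; decide) (by decide) (by simp only [pvNoStart]; decide) (by simp only [pvNoNew]; decide) (by simp only [pvNoStart]; decide) l]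
  simp only [List.cons_append, List.nil_append]
  rw [replace_eq_pvRun "Check [COMMAND_REDACTED] service status".toList "Check required service status on target system".toList (by decide) (pvRun [("Check if SSH service is running on port [REDACTED]".toList, "Verify SSH service is running on the correct port".toList), ("Verify the hostname [REDACTED] is correct".toList, "Verify the target hostname is correct".toList), ("Add public key to [PATH_REDACTED] on target host".toList, "Ensure SSH public key is authorized on target host".toList), ("Configure passwordless sudo for [COMMAND_REDACTED]".toList, "Configure appropriate system privileges for scanning".toList), ("Free up disk space in [PATH_REDACTED]".toList, "Free up sufficient disk space on target system".toList)] l)]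
  rw [pvRun_step [("Check if SSH service is running on port [REDACTED]".toList, "Verify SSH service is running on the correct port".toList), ("Verify the hostname [REDACTED] is correct".toList, "Verify the target hostname is correct".toList), ("Add public key to [PATH_REDACTED] on target host".toList, "Ensure SSH public key is authorized on target host".toList), ("Configure passwordless sudo for [COMMAND_REDACTED]".toList, "Configure appropriate system privileges for scanning".toList), ("Free up disk space in [PATH_REDACTED]".toList, "Free up sufficient disk space on target system".toList)] "Check [COMMAND_REDACTED] service status".toList "Check required service status on target system".toList (by simp only [PatsOK]; decide) (by decide) (by simp only [pvNoStart]; decide) (by simp only [pvNoNew]; decide) (by simp only [pvNoStart]; decide) l]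
  simp only [List.cons_append, List.nil_append]
  rfl

theorem pv_strings (g : String) : make_guidance_generic_py g = make_guidance_generic_py_alt g := by
  unfold make_guidance_generic_py make_guidance_generic_py_alt pvTbl
  simp only [List.foldl_cons, List.foldl_nil]
  rw [pvScan_eq]
  simp only [PySem.Str.replace, String.toList_ofList]
  exact congrArg String.ofList (pvChain g.toList)

-- ===== VERDICT (by name: the statement is the Claim_ definition above) =====
theorem make_guidance_generic_py_spec : Claim_equal_make_guidance_generic_py := by
  intro g _
  unfold Spec_make_guidance_generic_py
  exact pv_strings g
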